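-- pv_equiv track=rewrite | github.com/kacperpaczos/MP | 2024/Kto/main.py | porownaj_wyniki
-- ===== SOURCE A (Python) =====
-- def porownaj_wyniki(algosia, bajtek):
--     suma_algosia = sum(algosia)
--     suma_bajtek = sum(bajtek)
--     if suma_algosia == suma_bajtek:
--         for punkty in range(10, 0, -1):
--             konkursy_algosia = algosia.count(punkty)
--             konkursy_bajtek = bajtek.count(punkty)
--             if konkursy_algosia > konkursy_bajtek:
--                 return "Algosia"
--             elif konkursy_bajtek > konkursy_algosia:
--                 return "Bajtek"
--         return "Remis"
--     elif suma_algosia > suma_bajtek: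
--         return "Algosia"
--     else:
--         return "Bajtek"
-- ===== SOURCE B (Python) =====
-- def porownaj_wyniki(algosia, bajtek):
--     suma_a = sum(algosia)
--     suma_b = sum(bajtek)
--     if suma_a > suma_b:
--         return "Algosia"
--     if suma_b > suma_a:
--         return "Bajtek"
--     # equal sums: compare the descending-sorted multisets of in-range scores;
--     # the first (largest) place where they differ decides.
--     ra = sorted((x for x in algosia if 1 <= x <= 10), reverse=True)
--     rb = sorted((x for x in bajtek if 1 <= x <= 10), reverse=True)
--     if ra > rb:
--         return "Algosia"
--     if rb > ra:
--         return "Bajtek"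
--     return "Remis"
-- ===== Notes on version B (the rewrite author's own statement) =====
-- stated objective: alternative
-- what changed: Replaces A's per-value counting loop over 10..1 (twenty .count passes) with sorting each contestant's in-range scores in descending order and deciding by one lexicographic comparison of the two sorted lists (no counting at all).
import Mathlib
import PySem

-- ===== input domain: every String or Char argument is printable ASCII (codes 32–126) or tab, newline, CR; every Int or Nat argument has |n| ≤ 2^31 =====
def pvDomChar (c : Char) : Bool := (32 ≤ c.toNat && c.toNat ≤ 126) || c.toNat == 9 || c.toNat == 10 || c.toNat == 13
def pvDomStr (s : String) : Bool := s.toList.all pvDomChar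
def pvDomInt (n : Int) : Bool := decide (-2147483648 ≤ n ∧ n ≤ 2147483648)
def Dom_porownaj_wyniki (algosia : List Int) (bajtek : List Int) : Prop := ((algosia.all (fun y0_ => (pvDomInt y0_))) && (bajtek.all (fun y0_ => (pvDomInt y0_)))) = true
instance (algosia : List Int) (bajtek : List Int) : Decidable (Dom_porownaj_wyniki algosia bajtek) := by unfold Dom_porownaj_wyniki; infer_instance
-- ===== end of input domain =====

-- B replaces A's per-value counting loop by sorting each contestant's in-range scores
-- descending and comparing the two sorted lists lexicographically (objective: alternative).

-- ===== PORT A =====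
-- the 'for punkty in range(10, 0, -1)' loop with its early returns
def pvLoopA : List Int → List Int → List Int → String
  | [], _, _ => "Remis"
  | p :: ps, a, b =>
    let ka := PySem.List.count a p
    let kb := PySem.List.count b p
    if ka > kb then "Algosia"
    else if kb > ka then "Bajtek"
    else pvLoopA ps a b

def porownaj_wyniki (algosia : List Int) (bajtek : List Int) : String :=
  let suma_algosia := algosia.sum
  let suma_bajtek := bajtek.sum
  if suma_algosia = suma_bajtek then
    pvLoopA (PySem.List.pyRange 10 0 (-1)) algosia bajtek
  else if suma_algosia > suma_bajtek then "Algosia"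
  else "Bajtek"

-- ===== PORT B =====
-- Python list '>' (lexicographic on Int lists)
def pvLexGt : List Int → List Int → Bool
  | x :: xs, y :: ys => if x > y then true else if x < y then false else pvLexGt xs ys
  | _ :: _, [] => true
  | [], _ => false

def porownaj_wyniki_alt (algosia : List Int) (bajtek : List Int) : String :=
  let suma_a := algosia.sum
  let suma_b := bajtek.sum
  if suma_a > suma_b then "Algosia"
  else if suma_b > suma_a then "Bajtek"
  else
    let ra := PySem.List.sorted (algosia.filter fun x => decide (1 ≤ x) && decide (x ≤ 10)) (fun x => x) true
    let rb := PySem.List.sorted (bajtek.filter fun x => decide (1 ≤ x) && decide (x ≤ 10)) (fun x => x) true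
    if pvLexGt ra rb then "Algosia"
    else if pvLexGt rb ra then "Bajtek"
    else "Remis"

-- ===== PRECONDITION & SPEC =====
def Spec_porownaj_wyniki (algosia : List Int) (bajtek : List Int) (out : String) : Prop := out = porownaj_wyniki_alt algosia bajtek
instance (algosia : List Int) (bajtek : List Int) (out : String) : Decidable (Spec_porownaj_wyniki algosia bajtek out) := by unfold Spec_porownaj_wyniki; infer_instance

-- ===== CLAIM =====
def Claim_equal_porownaj_wyniki : Prop := ∀ (algosia : List Int) (bajtek : List Int), Dom_porownaj_wyniki algosia bajtek → Spec_porownaj_wyniki algosia bajtek (porownaj_wyniki algosia bajtek)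

-- ===== LEMMAS AND PROOFS =====
-- proof-only helper: the canonical descending arrangement of l's scores along ps
def pvCanon (ps : List Int) (l : List Int) : List Int :=
  ps.flatMap (fun p => List.replicate (PySem.List.count l p) p)

theorem mem_pvCanon {ps l : List Int} {x : Int} (h : x ∈ pvCanon ps l) : x ∈ ps := by
  unfold pvCanon at h
  simp only [List.mem_flatMap, List.mem_replicate] at h
  obtain ⟨p, hp, _, rfl⟩ := h
  exact hp


-- lexicographic comparison of blocks of equal leading values
theorem pvLexGt_replicate (p : Int) (m n : Nat) (r1 r2 : List Int)
    (h1 : ∀ x ∈ r1, x < p) (h2 : ∀ x ∈ r2, x < p) :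
    pvLexGt (List.replicate m p ++ r1) (List.replicate n p ++ r2) =
      (if n < m then true else if m < n then false else pvLexGt r1 r2) := by
  induction n generalizing m with
  | zero =>
    cases m with
    | zero => simp
    | succ m =>
      simp only [List.replicate_succ, List.cons_append]
      cases r2 with
      | nil => simp [pvLexGt]
      | cons y ys =>
        have := h2 y (by simp)
        simp [pvLexGt]
        omega
  | succ n ih =>
    cases m with
    | zero =>
      simp only [List.replicate_succ, List.cons_append]
      cases r1 with
      | nil => simp [pvLexGt]
      | cons x xs =>
        have := h1 x (by simp)
        simp [pvLexGt]
        omega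
    | succ m =>
      simp only [List.replicate_succ, List.cons_append, pvLexGt]
      rw [if_neg (by omega), if_neg (by omega)]
      rw [ih m]
      split_ifs <;> first | rfl | omega

-- A's loop equals the lexicographic comparison of the canonical arrangements
theorem pvLoopA_eq_lex (ps : List Int) (a b : List Int) (hps : ps.Pairwise (· > ·)) :
    pvLoopA ps a b =
      (if pvLexGt (pvCanon ps a) (pvCanon ps b) then "Algosia"
       else if pvLexGt (pvCanon ps b) (pvCanon ps a) then "Bajtek"
       else "Remis") := by
  induction ps with
  | nil => simp [pvLoopA, pvCanon, pvLexGt]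
  | cons p ps ih =>
    have hgt : ∀ q ∈ ps, q < p := fun q hq => (List.pairwise_cons.1 hps).1 q hq
    have hca : ∀ x ∈ pvCanon ps a, x < p := fun x hx => hgt x (mem_pvCanon hx)
    have hcb : ∀ x ∈ pvCanon ps b, x < p := fun x hx => hgt x (mem_pvCanon hx)
    have hcanon : ∀ l, pvCanon (p :: ps) l =
        List.replicate (PySem.List.count l p) p ++ pvCanon ps l := by
      intro l; simp [pvCanon]
    rw [hcanon a, hcanon b]
    rw [pvLexGt_replicate p _ _ _ _ hca hcb, pvLexGt_replicate p _ _ _ _ hcb hca]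
    simp only [pvLoopA]
    rw [ih (List.pairwise_cons.1 hps).2]
    split_ifs <;> first | rfl | omega | simp_all

-- sorted-descending of the in-range scores IS the canonical arrangement along [10,…,1]
theorem count_pvCanon (ps l : List Int) (hnd : ps.Nodup) (v : Int) :
    List.count v (pvCanon ps l) = if v ∈ ps then l.count v else 0 := by
  induction ps with
  | nil => simp [pvCanon]
  | cons p ps ih =>
    have hsplit : pvCanon (p :: ps) l =
        List.replicate (PySem.List.count l p) p ++ pvCanon ps l := by simp [pvCanon]
    rw [hsplit, List.count_append, ih (List.nodup_cons.1 hnd).2,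
        PySem.List.count_eq, List.count_replicate]
    by_cases h : v = p
    · subst h
      have hnm : v ∉ ps := (List.nodup_cons.1 hnd).1
      simp [hnm]
    · simp [h, Ne.symm h, List.mem_cons]

theorem pairwise_pvCanon (ps l : List Int) (hps : ps.Pairwise (· > ·)) :
    (pvCanon ps l).Pairwise (fun a b : Int => b ≤ a) := by
  induction ps with
  | nil => simp [pvCanon]
  | cons p ps ih =>
    have hsplit : pvCanon (p :: ps) l =
        List.replicate (PySem.List.count l p) p ++ pvCanon ps l := by simp [pvCanon]
    rw [hsplit, List.pairwise_append]
    refine ⟨?_, ih (List.pairwise_cons.1 hps).2, ?_⟩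
    · simp [List.pairwise_replicate]
    · intro x hx y hy
      have hxp : x = p := List.eq_of_mem_replicate hx
      have h2 := (List.pairwise_cons.1 hps).1 y (mem_pvCanon hy)
      subst hxp
      exact le_of_lt h2

theorem sorted_eq_pvCanon (l : List Int) :
    PySem.List.sorted (l.filter fun x => decide (1 ≤ x) && decide (x ≤ 10)) (fun x => x) true =
      pvCanon [10, 9, 8, 7, 6, 5, 4, 3, 2, 1] l := by
  set f := l.filter fun x => decide (1 ≤ x) && decide (x ≤ 10) with hf
  have hperm : (PySem.List.sorted f (fun x => x) true).Perm (pvCanon [10,9,8,7,6,5,4,3,2,1] l) := by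
    refine (PySem.List.sorted_perm f (fun x => x) true).trans ?_
    rw [List.perm_iff_count]
    intro v
    rw [count_pvCanon _ _ (by decide) v]
    have hmem : v ∈ ([10,9,8,7,6,5,4,3,2,1] : List Int) ↔ 1 ≤ v ∧ v ≤ 10 := by
      simp [List.mem_cons]; omega
    by_cases hv : (1 ≤ v ∧ v ≤ 10)
    · have hcf : List.count v f = l.count v := by
        rw [hf]; exact List.count_filter (by simp [hv.1, hv.2])
      rw [hcf, if_pos (hmem.2 hv)]
    · have hcf : List.count v f = 0 := by
        rw [hf, List.count_eq_zero]
        intro h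
        have := List.of_mem_filter h
        simp at this
        omega
      rw [hcf, if_neg (fun hm => hv (hmem.1 hm))]
  have hpw1 : (PySem.List.sorted f (fun x => x) true).Pairwise (fun a b : Int => b ≤ a) :=
    PySem.List.sorted_pairwise_rev f (fun x => x)
  have hpw2 : (pvCanon [10,9,8,7,6,5,4,3,2,1] l).Pairwise (fun a b : Int => b ≤ a) :=
    pairwise_pvCanon _ l (by decide)
  exact List.Perm.eq_of_pairwise (fun a b _ _ h1 h2 => le_antisymm h2 h1) hpw1 hpw2 hperm

theorem porownaj_wyniki_eq (algosia bajtek : List Int) :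
    porownaj_wyniki algosia bajtek = porownaj_wyniki_alt algosia bajtek := by
  unfold porownaj_wyniki porownaj_wyniki_alt
  simp only [gt_iff_lt]
  rw [sorted_eq_pvCanon, sorted_eq_pvCanon]
  have hrange : PySem.List.pyRange 10 0 (-1) = [10,9,8,7,6,5,4,3,2,1] := by decide
  rw [hrange, pvLoopA_eq_lex _ _ _ (by decide)]
  rcases lt_trichotomy algosia.sum bajtek.sum with h | h | h
  · have h1 : ¬ (algosia.sum = bajtek.sum) := by omega
    have h2 : ¬ (bajtek.sum < algosia.sum) := by omega
    rw [if_neg h1, if_neg h2, if_neg h2, if_pos h]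
  · have h1 : ¬ (bajtek.sum < algosia.sum) := by omega
    have h2 : ¬ (algosia.sum < bajtek.sum) := by omega
    rw [if_pos h, if_neg h1, if_neg h2]
  · have h1 : ¬ (algosia.sum = bajtek.sum) := by omega
    rw [if_neg h1, if_pos h, if_pos h]

-- ===== VERDICT =====
theorem porownaj_wyniki_spec : Claim_equal_porownaj_wyniki := by
  intro a b _
  exact porownaj_wyniki_eq a b
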